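-- pv_equiv track=rewrite | github.com/jane516/algorithm | 팩토리얼_7489.py | fac_non_zero
-- ===== SOURCE A (Python) =====
-- def fac_non_zero(n):
--     result = 1
--     count = 0
--     for i in range(1, n + 1):
--         result *= i
--     while result % 10 == 0:
--         result //= 10
--     return result % 10
-- ===== SOURCE B (Python) =====
-- def fac_non_zero(n):
--     # One pass over 1..n keeping only the 2,5-free part mod 10 and the
--     # exponent excess of 2 over 5; no big-integer factorial is ever built.
--     d = 1
--     twos = 0
--     for i in range(1, n + 1):
--         x = i
--         while x % 5 == 0:
--             x //= 5
--             twos -= 1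
--         while x % 2 == 0:
--             x //= 2
--             twos += 1
--         d = d * x % 10
--     return d * pow(2, twos, 10) % 10
-- ===== Notes on version B (the rewrite author's own statement) =====
-- stated objective: faster
-- what changed: Instead of building the full big-integer factorial and then stripping trailing zeros, B makes one pass over the range keeping only the product's part coprime to ten, reduced modulo ten, plus the excess of two-exponents over five-exponents, and reattaches the needed power of two modulo ten at the end, so no bignum arithmetic occurs.
import Mathlib
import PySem

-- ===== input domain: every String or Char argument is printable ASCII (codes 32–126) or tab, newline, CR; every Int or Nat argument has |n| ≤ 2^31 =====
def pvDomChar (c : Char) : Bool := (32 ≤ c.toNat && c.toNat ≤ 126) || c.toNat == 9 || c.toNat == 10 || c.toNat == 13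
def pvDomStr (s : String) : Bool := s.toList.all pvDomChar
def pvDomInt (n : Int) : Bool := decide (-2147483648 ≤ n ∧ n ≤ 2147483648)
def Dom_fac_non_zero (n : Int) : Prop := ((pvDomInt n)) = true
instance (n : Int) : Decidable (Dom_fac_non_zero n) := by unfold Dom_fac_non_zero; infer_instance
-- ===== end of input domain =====

-- B replaces A's big-integer factorial by a single pass that keeps only the 2,5-free part
-- of the product mod 10 and the excess of factor-2 over factor-5 exponents.

-- ===== PORT A =====
-- 'while result % 10 == 0: result //= 10'.  The extra guard '0 < r' only makes the recursion
-- well-founded; A's 'result' is always ≥ 1, so behaviour on reachable values is unchanged.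
def stripTens (r : Int) : Int :=
  if h : PySem.Int.mod r 10 = 0 ∧ 0 < r then stripTens (PySem.Int.floordiv r 10) else r
termination_by r.toNat
decreasing_by
  have h10 : PySem.Int.floordiv r 10 = r / 10 := PySem.Int.floordiv_eq_ediv_of_pos (by omega)
  have : (10:Int) ∣ r := (PySem.Int.mod_eq_zero_iff_dvd r 10).mp h.1
  rw [h10]; omega

def fac_non_zero (n : Int) : Int :=
  let result := (PySem.List.pyRange 1 (n + 1) 1).foldl (fun acc i => acc * i) 1
  PySem.Int.mod (stripTens result) 10

-- ===== PORT B =====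
-- 'while x % 5 == 0: x //= 5; twos -= 1'.  Guard '0 < x' only for well-foundedness (x = i ≥ 1).
def strip5 (x t : Int) : Int × Int :=
  if h : PySem.Int.mod x 5 = 0 ∧ 0 < x then strip5 (PySem.Int.floordiv x 5) (t - 1) else (x, t)
termination_by x.toNat
decreasing_by
  have h5 : PySem.Int.floordiv x 5 = x / 5 := PySem.Int.floordiv_eq_ediv_of_pos (by omega)
  have : (5:Int) ∣ x := (PySem.Int.mod_eq_zero_iff_dvd x 5).mp h.1
  rw [h5]; omega

-- 'while x % 2 == 0: x //= 2; twos += 1'.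
def strip2 (x t : Int) : Int × Int :=
  if h : PySem.Int.mod x 2 = 0 ∧ 0 < x then strip2 (PySem.Int.floordiv x 2) (t + 1) else (x, t)
termination_by x.toNat
decreasing_by
  have h2 : PySem.Int.floordiv x 2 = x / 2 := PySem.Int.floordiv_eq_ediv_of_pos (by omega)
  have : (2:Int) ∣ x := (PySem.Int.mod_eq_zero_iff_dvd x 2).mp h.1
  rw [h2]; omega

-- 'pow(2, twos, 10)': 'twos' is ≥ 0 whenever the return line runs, so '2 ^ twos.toNat % 10' is exact there.
def fac_non_zero_alt (n : Int) : Int :=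
  let p := (PySem.List.pyRange 1 (n + 1) 1).foldl
    (fun (dt : Int × Int) i =>
      let s5 := strip5 i dt.2
      let s2 := strip2 s5.1 s5.2
      (PySem.Int.mod (dt.1 * s2.1) 10, s2.2))
    (1, 0)
  PySem.Int.mod (p.1 * PySem.Int.mod (2 ^ p.2.toNat) 10) 10

-- ===== PRECONDITION & SPEC =====
def Spec_fac_non_zero (n : Int) (out : Int) : Prop := out = fac_non_zero_alt n
instance (n : Int) (out : Int) : Decidable (Spec_fac_non_zero n out) := by unfold Spec_fac_non_zero; infer_instance

-- ===== CLAIM (what is proved, stated in full; the proofs are below) =====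
def Claim_equal_fac_non_zero : Prop := ∀ (n : Int), Dom_fac_non_zero n → Spec_fac_non_zero n (fac_non_zero n)

-- ===== LEMMAS AND PROOFS =====

-- A's loop builds the factorial.
theorem fact_fold (m : Nat) :
    (PySem.List.pyRange 1 ((m : Int) + 1) 1).foldl (fun acc i => acc * i) 1
      = ((Nat.factorial m : Nat) : Int) := by
  induction m with
  | zero => simp [PySem.List.pyRange_one_eq_nil, Nat.factorial]
  | succ k ih =>
    have h : PySem.List.pyRange 1 ((↑(k+1) : Int) + 1) 1
        = PySem.List.pyRange 1 ((k : Int) + 1) 1 ++ [(k : Int) + 1] := by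
      have := PySem.List.pyRange_one_succ_right (a := 1) (b := (k : Int) + 1) (by omega)
      push_cast
      push_cast at this
      convert this using 2
    rw [h, List.foldl_append, ih, Nat.factorial_succ]
    simp only [List.foldl_cons, List.foldl_nil]
    push_cast
    ring

theorem strip5_spec : ∀ (k : Nat) (x : Int), x.toNat = k → 0 < x →
    ∃ (y e : Nat), ¬ (5 ∣ y) ∧ 0 < y ∧ x = (5 : Int) ^ e * y ∧
      ∀ t, strip5 x t = ((y : Int), t - e) := by
  intro k
  induction k using Nat.strong_induction_on with
  | _ k ih =>
    intro x hk hx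
    by_cases h : PySem.Int.mod x 5 = 0
    · have hdvd : (5:Int) ∣ x := (PySem.Int.mod_eq_zero_iff_dvd x 5).mp h
      have hfd : PySem.Int.floordiv x 5 = x / 5 := PySem.Int.floordiv_eq_ediv_of_pos (by omega)
      have hxq : x = 5 * (x / 5) := (Int.mul_ediv_cancel' hdvd).symm
      have hq : 0 < x / 5 := by omega
      have hlt : (x / 5).toNat < k := by omega
      obtain ⟨y, e, hy5, hy0, hyx, hrec⟩ := ih _ hlt (x / 5) rfl hq
      refine ⟨y, e + 1, hy5, hy0, by rw [hxq, hyx]; ring, fun t => ?_⟩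
      rw [strip5, dif_pos (And.intro h hx), hfd, hrec]
      push_cast; ring_nf
    · refine ⟨x.toNat, 0, ?_, by omega, by simp; omega, fun t => ?_⟩
      · intro hc
        exact h ((PySem.Int.mod_eq_zero_iff_dvd x 5).mpr
          (by exact_mod_cast Int.natCast_dvd_natCast.mpr hc |>.trans (dvd_of_eq (by omega))))
      · rw [strip5]
        simp only [h, false_and, dif_neg, not_false_iff]
        simp; omega

theorem strip2_spec : ∀ (k : Nat) (x : Int), x.toNat = k → 0 < x →
    ∃ (y e : Nat), ¬ (2 ∣ y) ∧ 0 < y ∧ x = (2 : Int) ^ e * y ∧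
      ∀ t, strip2 x t = ((y : Int), t + e) := by
  intro k
  induction k using Nat.strong_induction_on with
  | _ k ih =>
    intro x hk hx
    by_cases h : PySem.Int.mod x 2 = 0
    · have hdvd : (2:Int) ∣ x := (PySem.Int.mod_eq_zero_iff_dvd x 2).mp h
      have hfd : PySem.Int.floordiv x 2 = x / 2 := PySem.Int.floordiv_eq_ediv_of_pos (by omega)
      have hxq : x = 2 * (x / 2) := (Int.mul_ediv_cancel' hdvd).symm
      have hq : 0 < x / 2 := by omega
      have hlt : (x / 2).toNat < k := by omega
      obtain ⟨y, e, hy2, hy0, hyx, hrec⟩ := ih _ hlt (x / 2) rfl hq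
      refine ⟨y, e + 1, hy2, hy0, by rw [hxq, hyx]; ring, fun t => ?_⟩
      rw [strip2, dif_pos (And.intro h hx), hfd, hrec]
      push_cast; ring_nf
    · refine ⟨x.toNat, 0, ?_, by omega, by simp; omega, fun t => ?_⟩
      · intro hc
        exact h ((PySem.Int.mod_eq_zero_iff_dvd x 2).mpr
          (by exact_mod_cast Int.natCast_dvd_natCast.mpr hc |>.trans (dvd_of_eq (by omega))))
      · rw [strip2]
        simp only [h, false_and, dif_neg, not_false_iff]
        simp; omega

-- B's loop: d is the 2,5-free part of m! mod 10, t is the exponent excess a - b.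
theorem alt_fold (m : Nat) :
    ∃ (M a b : Nat), ¬ (2 ∣ M) ∧ ¬ (5 ∣ M) ∧ 0 < M ∧
      Nat.factorial m = 2 ^ a * 5 ^ b * M ∧
      (PySem.List.pyRange 1 ((m : Int) + 1) 1).foldl
        (fun (dt : Int × Int) i =>
          let s5 := strip5 i dt.2
          let s2 := strip2 s5.1 s5.2
          (PySem.Int.mod (dt.1 * s2.1) 10, s2.2))
        (1, 0) = (((M % 10 : Nat) : Int), (a : Int) - (b : Int)) := by
  induction m with
  | zero =>
    exact ⟨1, 0, 0, by norm_num, by norm_num, by norm_num, by simp [Nat.factorial],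
      by simp [PySem.List.pyRange_one_eq_nil]⟩
  | succ k ih =>
    obtain ⟨M, a, b, hM2, hM5, hM0, hfac, hfold⟩ := ih
    have hi : (0:Int) < (k : Int) + 1 := by omega
    obtain ⟨y5, e5, hy5d, hy5p, hy5x, hrec5⟩ := strip5_spec ((k:Int)+1).toNat ((k:Int)+1) rfl hi
    obtain ⟨y, e2, hyd, hyp, hyx, hrec2⟩ := strip2_spec (y5:Int).toNat (y5:Int) rfl (by exact_mod_cast hy5p)
    have hy5not5 : ¬ (5 ∣ y) := by
      intro hc
      apply hy5d
      have : y ∣ y5 := by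
        have : (y:Int) ∣ (y5:Int) := ⟨2 ^ e2, by rw [hyx]; ring⟩
        exact_mod_cast this
      exact hc.trans this
    have hknat : k + 1 = 5 ^ e5 * (2 ^ e2 * y) := by
      have : ((k:Int) + 1) = ((5 ^ e5 * (2 ^ e2 * y) : Nat) : Int) := by
        rw [hy5x, hyx]; push_cast; ring
      exact_mod_cast this
    refine ⟨M * y, a + e2, b + e5, ?_, ?_, by positivity, ?_, ?_⟩
    · intro hc
      rcases (Nat.Prime.dvd_mul Nat.prime_two).mp hc with h | h
      · exact hM2 h
      · exact hyd h
    · intro hc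
      rcases (Nat.Prime.dvd_mul (by norm_num : Nat.Prime 5)).mp hc with h | h
      · exact hM5 h
      · exact hy5not5 h
    · rw [Nat.factorial_succ, hfac, hknat]; ring
    · have hsplit : PySem.List.pyRange 1 ((↑(k+1) : Int) + 1) 1
          = PySem.List.pyRange 1 ((k : Int) + 1) 1 ++ [(k : Int) + 1] := by
        have := PySem.List.pyRange_one_succ_right (a := 1) (b := (k : Int) + 1) (by omega)
        push_cast
        push_cast at this
        convert this using 2
      rw [hsplit, List.foldl_append, hfold]
      simp only [List.foldl_cons, List.foldl_nil]
      rw [hrec5, hrec2]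
      refine Prod.ext ?_ (by push_cast; ring)
      simp only []
      rw [PySem.Int.mod_eq_emod_of_pos (by norm_num)]
      push_cast
      rw [Int.mul_emod, Int.mul_emod (M:Int) (y:Int), Int.emod_emod_of_dvd _ (dvd_refl 10)]

theorem stripTens_pow (b a M : Nat) (hba : b ≤ a) (h5 : ¬ (5 ∣ M)) (hM : 0 < M) :
    stripTens ((2 ^ a * 5 ^ b * M : Nat) : Int) = ((2 ^ (a - b) * M : Nat) : Int) := by
  induction b generalizing a with
  | zero =>
    have hnd : ¬ PySem.Int.mod ((2 ^ a * 5 ^ 0 * M : Nat) : Int) 10 = 0 := by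
      rw [PySem.Int.mod_eq_zero_iff_dvd]
      intro hc
      have h10 : (10:Nat) ∣ 2 ^ a * 5 ^ 0 * M := by exact_mod_cast hc
      have h5d : (5:Nat) ∣ 2 ^ a * M := by
        simpa using dvd_trans (by norm_num : (5:Nat) ∣ 10) h10
      rcases (Nat.Prime.dvd_mul (by norm_num)).mp h5d with h | h
      · exact absurd (Nat.Prime.dvd_of_dvd_pow (by norm_num) h) (by norm_num)
      · exact h5 h
    rw [stripTens, dif_neg (fun hc => hnd hc.1)]
    simp
  | succ b ih =>
    have ha : 1 ≤ a := le_trans (Nat.succ_le_succ (Nat.zero_le b)) hba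
    have hsplit : (2 ^ a * 5 ^ (b+1) * M : Nat) = 10 * (2 ^ (a-1) * 5 ^ b * M) := by
      have h2a : 2 ^ a = 2 * 2 ^ (a-1) := by
        conv_lhs => rw [show a = 1 + (a-1) by omega]
        rw [pow_add, pow_one]
      rw [h2a, pow_succ]; ring
    have hpos : (0:Int) < ((2 ^ a * 5 ^ (b+1) * M : Nat) : Int) := by positivity
    have hmod : PySem.Int.mod ((2 ^ a * 5 ^ (b+1) * M : Nat) : Int) 10 = 0 := by
      rw [PySem.Int.mod_eq_zero_iff_dvd, hsplit]
      push_cast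
      exact Dvd.intro _ rfl
    rw [stripTens, dif_pos ⟨hmod, hpos⟩]
    have hfd : PySem.Int.floordiv ((2 ^ a * 5 ^ (b+1) * M : Nat) : Int) 10
        = ((2 ^ (a-1) * 5 ^ b * M : Nat) : Int) := by
      rw [PySem.Int.floordiv_eq_ediv_of_pos (by norm_num), hsplit]
      push_cast
      rw [Int.mul_ediv_cancel_left _ (by norm_num)]
    rw [hfd, ih (a-1) (by omega), show a - 1 - b = a - (b+1) by omega]

-- Legendre: v2(m!) ≥ v5(m!).
theorem exp2_ge_exp5 (m a b M : Nat) (h2 : ¬ (2 ∣ M)) (h5 : ¬ (5 ∣ M))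
    (hfac : Nat.factorial m = 2 ^ a * 5 ^ b * M) : b ≤ a := by
  have hM0 : M ≠ 0 := by rintro rfl; exact h2 (dvd_zero 2)
  have hfa : (Nat.factorial m).factorization 2 = a := by
    rw [hfac, Nat.factorization_mul (by positivity) hM0,
      Nat.factorization_mul (pow_ne_zero _ two_ne_zero) (pow_ne_zero _ (by norm_num)),
      Nat.Prime.factorization_pow Nat.prime_two, Nat.Prime.factorization_pow (by norm_num)]
    simp [Nat.factorization_eq_zero_of_not_dvd h2]
  have hfb : (Nat.factorial m).factorization 5 = b := by
    rw [hfac, Nat.factorization_mul (by positivity) hM0,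
      Nat.factorization_mul (pow_ne_zero _ two_ne_zero) (pow_ne_zero _ (by norm_num)),
      Nat.Prime.factorization_pow Nat.prime_two, Nat.Prime.factorization_pow (by norm_num)]
    simp [Nat.factorization_eq_zero_of_not_dvd h5]
  have hla : (Nat.factorial m).factorization 2 = ∑ i ∈ Finset.Ico 1 (m+1), m / 2 ^ i :=
    Nat.factorization_factorial Nat.prime_two (Nat.lt_succ_of_le (Nat.log_le_self 2 m))
  have hlb : (Nat.factorial m).factorization 5 = ∑ i ∈ Finset.Ico 1 (m+1), m / 5 ^ i :=
    Nat.factorization_factorial (by norm_num) (Nat.lt_succ_of_le (Nat.log_le_self 5 m))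
  have hsum : ∑ i ∈ Finset.Ico 1 (m+1), m / 5 ^ i ≤ ∑ i ∈ Finset.Ico 1 (m+1), m / 2 ^ i := by
    apply Finset.sum_le_sum
    intro i _
    exact Nat.div_le_div_left (Nat.pow_le_pow_left (by norm_num) i) (Nat.two_pow_pos i)
  omega

-- ===== VERDICT (by name: the statement is the Claim_ definition above) =====
theorem fac_non_zero_spec : Claim_equal_fac_non_zero := by
  intro n _
  show fac_non_zero n = fac_non_zero_alt n
  by_cases hn : n ≤ 0
  · unfold fac_non_zero fac_non_zero_alt
    rw [PySem.List.pyRange_one_eq_nil (by omega)]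
    simp only [List.foldl_nil]
    rw [stripTens, dif_neg (by decide)]
    decide
  · have hm : n = ((n.toNat : Nat) : Int) := by omega
    rw [hm]
    set m := n.toNat with hmdef
    obtain ⟨M, a, b, hM2, hM5, hM0, hfac, hfold⟩ := alt_fold m
    have hba : b ≤ a := exp2_ge_exp5 m a b M hM2 hM5 hfac
    unfold fac_non_zero fac_non_zero_alt
    simp only [fact_fold, hfold]
    rw [hfac, stripTens_pow b a M hba hM5 hM0]
    have ht : ((a : Int) - (b : Int)).toNat = a - b := by omega
    rw [ht]
    rw [PySem.Int.mod_eq_emod_of_pos (a := ((2 ^ (a - b) * M : Nat) : Int)) (by norm_num),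
      PySem.Int.mod_eq_emod_of_pos (a := (2 ^ (a - b) : Int)) (by norm_num),
      PySem.Int.mod_eq_emod_of_pos (by norm_num)]
    push_cast
    rw [← Int.mul_emod, mul_comm]
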